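-- pv_equiv track=rewrite | github.com/jykim11/advant-of-code-2024 | 2024 Advant of Code/day 2/part-2.py | is_safe_with_dampener
-- ===== SOURCE A (Python) =====
-- def is_safe(levels):
--     # Calculate differences between adjacent numbers
--     differences = []
--     for i in range(len(levels) - 1):
--         difference = levels[i + 1] - levels[i]
--         differences.append(difference)
--
--     # Check if sequence is strictly increasing
--     is_increasing = True  # Assume sequence is increasing until proven otherwise
--     for diff in differences:
--         if diff <= 0 or diff > 3:
--             is_increasing = False
--             break
--
--     # Check if sequence is strictly decreasing
--     is_decreasing = True  # Assume sequence is decreasing until proven otherwise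
--     for diff in differences:
--         if diff >= 0 or diff < -3:
--             is_decreasing = False
--             break
--
--     # Return True if either increasing or decreasing conditions are met
--     return is_increasing or is_decreasing
--
-- def is_safe_with_dampener(levels):
--
--     # First check if it's safe without removing any number
--     if is_safe(levels):
--         return True
--
--     # Try removing each number one at a time
--     for i in range(len(levels)):
--         # Create new sequence without current number
--         test_sequence = levels[:i] + levels[i+1:]
--
--         # Check if this sequence is safe
--         if is_safe(test_sequence):
--             return True
--
--     return False
-- ===== SOURCE B (Python) =====
-- def is_safe_with_dampener(levels):
--     # Single scan: if the sequence is unsafe, any fixing removal must touch the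
--     # first pair violating the increasing rule or the first pair violating the
--     # decreasing rule, so only those <=4 indices are tested (O(n) total).
--     def inc_ok(d):
--         return 1 <= d <= 3
--
--     def dec_ok(d):
--         return -3 <= d <= -1
--
--     diffs = [b - a for a, b in zip(levels, levels[1:])]
--     if all(map(inc_ok, diffs)) or all(map(dec_ok, diffs)):
--         return True
--     j = next(i for i, d in enumerate(diffs) if not inc_ok(d))
--     k = next(i for i, d in enumerate(diffs) if not dec_ok(d))
--
--     def safe_without(m):
--         rest = levels[:m] + levels[m + 1:]
--         ds = [b - a for a, b in zip(rest, rest[1:])]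
--         return all(map(inc_ok, ds)) or all(map(dec_ok, ds))
--
--     return any(safe_without(m) for m in (j, j + 1, k, k + 1))
-- ===== Notes on version B (the rewrite author's own statement) =====
-- stated objective: faster
-- what changed: Instead of retrying is_safe on all n removals, B makes one pass to find the first pair violating the increasing rule and the first pair violating the decreasing rule, and tests removal only at those <=4 indices (any other removal leaves a violating pair adjacent).
import Mathlib
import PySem

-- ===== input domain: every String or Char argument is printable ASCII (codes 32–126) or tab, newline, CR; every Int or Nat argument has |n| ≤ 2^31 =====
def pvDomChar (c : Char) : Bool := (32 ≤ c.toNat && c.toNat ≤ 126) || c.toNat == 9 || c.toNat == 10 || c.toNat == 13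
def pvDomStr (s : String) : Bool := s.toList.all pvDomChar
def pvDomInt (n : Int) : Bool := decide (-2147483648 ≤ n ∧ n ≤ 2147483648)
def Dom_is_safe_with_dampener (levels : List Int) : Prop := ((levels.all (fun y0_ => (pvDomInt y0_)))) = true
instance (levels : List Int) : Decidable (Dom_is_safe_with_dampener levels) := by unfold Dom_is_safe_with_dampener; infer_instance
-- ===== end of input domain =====

-- B replaces A's try-every-removal scan by testing only the ≤4 removal indices touching
-- the first increasing-rule and first decreasing-rule violations (objective: faster, O(n) vs O(n^2)).


-- ===== PORT A =====
-- differences: the loop 'for i in range(len(levels)-1): differences.append(levels[i+1]-levels[i])'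
def pvDiffsA (levels : List Int) : List Int :=
  (PySem.List.pyRange 0 ((levels.length : Int) - 1) 1).foldl
    (fun acc i => acc ++ [PySem.List.pyGetD levels (i + 1) 0 - PySem.List.pyGetD levels i 0]) []
-- the 'for diff in differences: if …: is_increasing = False; break' loop
def pvIncLoop : List Int → Bool
  | [] => true
  | d :: ds => if d ≤ 0 ∨ d > 3 then false else pvIncLoop ds
def pvDecLoop : List Int → Bool
  | [] => true
  | d :: ds => if d ≥ 0 ∨ d < -3 then false else pvDecLoop ds
def pvIsSafe (levels : List Int) : Bool :=
  let differences := pvDiffsA levels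
  pvIncLoop differences || pvDecLoop differences
def is_safe_with_dampener (levels : List Int) : Bool :=
  if pvIsSafe levels then true
  else
    -- 'for i in range(len(levels)): if is_safe(levels[:i] + levels[i+1:]): return True' / 'return False'
    (PySem.List.pyRange 0 (levels.length : Int) 1).any fun i =>
      pvIsSafe (PySem.List.slice levels none (some i) ++ PySem.List.slice levels (some (i + 1)) none)

-- ===== PORT B =====
def pvOkInc (d : Int) : Bool := decide (1 ≤ d ∧ d ≤ 3)
def pvOkDec (d : Int) : Bool := decide (-3 ≤ d ∧ d ≤ -1)
-- 'diffs = [b - a for a, b in zip(levels, levels[1:])]'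
def pvDiffsB (levels : List Int) : List Int :=
  List.zipWith (fun a b => b - a) levels levels.tail
def pvSafeB (levels : List Int) : Bool :=
  (pvDiffsB levels).all pvOkInc || (pvDiffsB levels).all pvOkDec
-- 'safe_without(m)': levels[:m] + levels[m+1:] is eraseIdx m (exact for every m ≥ 0)
def pvSafeWithout (levels : List Int) (m : Nat) : Bool :=
  pvSafeB (levels.eraseIdx m)
def is_safe_with_dampener_alt (levels : List Int) : Bool :=
  if pvSafeB levels then true
  else
    let ds := pvDiffsB levels
    let j := ds.findIdx fun d => !pvOkInc d
    let k := ds.findIdx fun d => !pvOkDec d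
    [j, j + 1, k, k + 1].any (pvSafeWithout levels)

-- ===== PRECONDITION & SPEC =====
def Spec_is_safe_with_dampener (levels : List Int) (out : Bool) : Prop := out = is_safe_with_dampener_alt levels
instance (levels : List Int) (out : Bool) : Decidable (Spec_is_safe_with_dampener levels out) := by unfold Spec_is_safe_with_dampener; infer_instance

-- ===== CLAIM (what is proved, stated in full; the proofs are below) =====
def Claim_equal_is_safe_with_dampener : Prop := ∀ (levels : List Int), Dom_is_safe_with_dampener levels → Spec_is_safe_with_dampener levels (is_safe_with_dampener levels)

-- ===== LEMMAS AND PROOFS =====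

theorem pvIncLoop_eq_all (ds : List Int) : pvIncLoop ds = ds.all pvOkInc := by
  induction ds with
  | nil => rfl
  | cons d ds ih =>
    by_cases h : d ≤ 0 ∨ d > 3
    · have h1 : ¬(1 ≤ d ∧ d ≤ 3) := by omega
      simp [pvIncLoop, h, pvOkInc, h1]
    · have h1 : 1 ≤ d ∧ d ≤ 3 := by omega
      simp [pvIncLoop, h, pvOkInc, h1, ih]

theorem pvDecLoop_eq_all (ds : List Int) : pvDecLoop ds = ds.all pvOkDec := by
  induction ds with
  | nil => rfl
  | cons d ds ih =>
    by_cases h : d ≥ 0 ∨ d < -3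
    · have h1 : ¬(-3 ≤ d ∧ d ≤ -1) := by omega
      simp [pvDecLoop, h, pvOkDec, h1]
    · have h1 : -3 ≤ d ∧ d ≤ -1 := by omega
      simp [pvDecLoop, h, pvOkDec, h1, ih]

theorem pvDiffsA_eq (levels : List Int) : pvDiffsA levels = pvDiffsB levels := by
  unfold pvDiffsA
  rw [PySem.List.foldl_append_singleton_eq_map]
  cases levels with
  | nil => rfl
  | cons x xs =>
    have hcast : ((x :: xs).length : Int) - 1 = ((xs.length : Nat) : Int) := by
      push_cast [List.length_cons]
      ring
    rw [hcast, PySem.List.pyRange_zero_natCast, List.map_map]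
    apply List.ext_getElem
    · simp [pvDiffsB, List.length_zipWith]
    · intro i h1 h2
      simp only [List.nil_append, List.getElem_map, List.getElem_range, Function.comp_apply]
      have hi : i < xs.length := by simpa using h1
      have hx1 : (i : Int) + 1 = ((i + 1 : Nat) : Int) := by push_cast; ring
      rw [hx1]
      rw [PySem.List.pyGetD_natCast, PySem.List.pyGetD_natCast]
      have hlt1 : i + 1 < (x :: xs).length := by simp; omega
      have hlt2 : i < (x :: xs).length := by simp; omega
      rw [List.getD_eq_getElem _ _ hlt1, List.getD_eq_getElem _ _ hlt2]
      simp [pvDiffsB, List.getElem_zipWith]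

theorem pvIsSafe_eq (levels : List Int) : pvIsSafe levels = pvSafeB levels := by
  simp [pvIsSafe, pvSafeB, pvDiffsA_eq, pvIncLoop_eq_all, pvDecLoop_eq_all]

theorem slice_pair_eq_eraseIdx (levels : List Int) (i : Nat) :
    PySem.List.slice levels none (some (i : Int)) ++
      PySem.List.slice levels (some ((i : Int) + 1)) none = levels.eraseIdx i := by
  have hx1 : (i : Int) + 1 = ((i + 1 : Nat) : Int) := by push_cast; ring
  rw [hx1, PySem.List.slice_to_natCast, PySem.List.slice_from_natCast,
    List.eraseIdx_eq_take_drop_succ]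

-- A's dampener in closed form: safe, or some single removal is safe.
theorem portA_eq (levels : List Int) :
    is_safe_with_dampener levels =
      (pvSafeB levels || (List.range levels.length).any (fun i => pvSafeB (levels.eraseIdx i))) := by
  unfold is_safe_with_dampener
  rw [pvIsSafe_eq]
  by_cases hs : pvSafeB levels = true
  · simp [hs]
  · rw [Bool.not_eq_true] at hs
    simp only [hs, Bool.false_eq_true, if_false, Bool.false_or]
    rw [PySem.List.pyRange_zero_natCast, List.any_map]
    congr 1
    funext i
    simp only [Function.comp]
    rw [slice_pair_eq_eraseIdx, pvIsSafe_eq]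

-- (diffs l).all ok says every adjacent pair of l is ok.
theorem all_diffs_iff (ok : Int → Bool) (l : List Int) :
    (pvDiffsB l).all ok = true ↔
      ∀ i : Nat, (h : i + 1 < l.length) → ok (l[i + 1] - l[i]'(by omega)) = true := by
  unfold pvDiffsB
  rw [List.all_eq_true]
  constructor
  · intro h i hi
    have hlen : i < (List.zipWith (fun a b => b - a) l l.tail).length := by
      simp [List.length_zipWith, List.length_tail]; omega
    have := h _ (List.getElem_mem hlen)
    rwa [List.getElem_zipWith, List.getElem_tail] at this
  · intro h x hx
    obtain ⟨i, hi, rfl⟩ := List.getElem_of_mem hx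
    have hi' : i + 1 < l.length := by
      simp [List.length_zipWith, List.length_tail] at hi; omega
    rw [List.getElem_zipWith, List.getElem_tail]
    exact h i hi'

-- If index m is away from the pair (j, j+1), that pair stays adjacent after erasing m.
theorem ok_of_erase (ok : Int → Bool) (l : List Int) (j m : Nat)
    (hj : j + 1 < l.length) (h1 : m ≠ j) (h2 : m ≠ j + 1)
    (hall : (pvDiffsB (l.eraseIdx m)).all ok = true) :
    ok (l[j + 1] - l[j]'(by omega)) = true := by
  by_cases hm : l.length ≤ m
  · rw [List.eraseIdx_of_length_le hm] at hall
    exact (all_diffs_iff ok l).mp hall j hj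
  · rw [Nat.not_le] at hm
    have hlen : (l.eraseIdx m).length = l.length - 1 := by
      rw [List.length_eraseIdx]; simp [hm]
    rcases Nat.lt_or_ge m j with hmj | hmj
    · -- m < j: the pair sits at positions (j-1, j) of the erased list
      obtain ⟨jp, rfl⟩ : ∃ jp, j = jp + 1 := ⟨j - 1, by omega⟩
      have hjp : jp + 1 < (l.eraseIdx m).length := by omega
      have := (all_diffs_iff ok _).mp hall jp hjp
      rwa [List.getElem_eraseIdx_of_ge _ (by omega), List.getElem_eraseIdx_of_ge _ (by omega)] at this
    · -- j + 1 < m: the pair sits at positions (j, j+1)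
      have hmgt : j + 1 < m := by omega
      have hjp : j + 1 < (l.eraseIdx m).length := by omega
      have := (all_diffs_iff ok _).mp hall j hjp
      rwa [List.getElem_eraseIdx_of_lt _ (by omega), List.getElem_eraseIdx_of_lt _ (by omega)] at this

-- If erasing m makes all diffs ok, yet position jv (a not-ok diff) exists, then m ∈ {jv, jv+1}.
theorem erase_mem_of_all (ok : Int → Bool) (l : List Int) (jv m : Nat)
    (hjv : jv < (pvDiffsB l).length) (hbad : ok ((pvDiffsB l)[jv]) = false)
    (hall : (pvDiffsB (l.eraseIdx m)).all ok = true) :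
    m = jv ∨ m = jv + 1 := by
  by_contra hcon
  rw [not_or] at hcon
  have hlen : jv + 1 < l.length := by
    simp [pvDiffsB, List.length_zipWith, List.length_tail] at hjv; omega
  have := ok_of_erase ok l jv m hlen hcon.1 hcon.2 hall
  have hd : (pvDiffsB l)[jv] = l[jv + 1] - l[jv]'(by omega) := by
    simp [pvDiffsB, List.getElem_zipWith, List.getElem_tail]
  rw [hd] at hbad
  rw [this] at hbad
  exact absurd hbad (by simp)

-- ===== VERDICT (by name: the statement is the Claim_ definition above) =====
theorem is_safe_with_dampener_spec : Claim_equal_is_safe_with_dampener := by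
  intro levels _
  unfold Spec_is_safe_with_dampener is_safe_with_dampener_alt
  rw [portA_eq]
  by_cases hs : pvSafeB levels = true
  · simp [hs]
  · rw [Bool.not_eq_true] at hs
    simp only [hs, Bool.false_eq_true, if_false, Bool.false_or]
    have hs' := hs
    rw [pvSafeB, Bool.or_eq_false_iff] at hs'
    obtain ⟨hsI, hsD⟩ := hs'
    rw [List.all_eq_false] at hsI hsD
    have hjI : (pvDiffsB levels).findIdx (fun d => !pvOkInc d) < (pvDiffsB levels).length := by
      rw [List.findIdx_lt_length]
      obtain ⟨x, hx, hpx⟩ := hsI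
      exact ⟨x, hx, by simp [Bool.not_eq_true] at hpx ⊢; exact hpx⟩
    have hjD : (pvDiffsB levels).findIdx (fun d => !pvOkDec d) < (pvDiffsB levels).length := by
      rw [List.findIdx_lt_length]
      obtain ⟨x, hx, hpx⟩ := hsD
      exact ⟨x, hx, by simp [Bool.not_eq_true] at hpx ⊢; exact hpx⟩
    set j := (pvDiffsB levels).findIdx (fun d => !pvOkInc d) with hjdef
    set k := (pvDiffsB levels).findIdx (fun d => !pvOkDec d) with hkdef
    have hdlen : (pvDiffsB levels).length = levels.length - 1 := by
      simp [pvDiffsB, List.length_zipWith, List.length_tail]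
    have hbadj : pvOkInc ((pvDiffsB levels)[j]'hjI) = false := by
      have := List.findIdx_getElem (w := hjI)
      simpa using this
    have hbadk : pvOkDec ((pvDiffsB levels)[k]'hjD) = false := by
      have := List.findIdx_getElem (w := hjD)
      simpa using this
    have hj2 : j + 1 < levels.length := by omega
    have hk2 : k + 1 < levels.length := by omega
    apply Bool.eq_iff_iff.mpr
    rw [List.any_eq_true, List.any_eq_true]
    constructor
    · rintro ⟨i, hi, hsafe⟩
      refine ⟨i, ?_, by simpa [pvSafeWithout] using hsafe⟩
      simp only [pvSafeB, Bool.or_eq_true] at hsafe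
      rcases hsafe with h | h
      · rcases erase_mem_of_all pvOkInc levels j i hjI hbadj h with rfl | rfl <;> simp
      · rcases erase_mem_of_all pvOkDec levels k i hjD hbadk h with rfl | rfl <;> simp
    · rintro ⟨m, hm, hsafe⟩
      refine ⟨m, ?_, by simpa [pvSafeWithout] using hsafe⟩
      rw [List.mem_range]
      simp only [List.mem_cons, List.not_mem_nil, or_false] at hm
      rcases hm with rfl | rfl | rfl | rfl <;> omega
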